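-- pv_equiv track=rewrite | github.com/Dovshmi/Mordi | patch_mordi_builder.py | _parse_terms_grammar
-- ===== SOURCE A (Python) =====
-- def _parse_terms_grammar(terms_raw: str):
--     # מפענח תחביר: פסיק = קבוצות, "/" בין מילים = OR בתוך קבוצה, "*" בסוף חלופה => הקבוצה חובה
--     # מחזיר (required_groups, optional_groups), כאשר כל קבוצה היא רשימת חלופות (מחרוזות).
--     groups = []
--     for raw in [t.strip() for t in terms_raw.split(",") if t.strip()]:
--         alts = [a.strip() for a in raw.split("/") if a.strip()]
--         required = False
--         cleaned = []
--         for a in alts: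
--             if a.endswith("*") or a.startswith("*"):
--                 required = True
--                 a = a.strip("*").strip()
--             cleaned.append(a)
--         if cleaned:
--             groups.append((required, cleaned))
--     req = [alts for (req, alts) in groups if req]
--     opt = [alts for (req, alts) in groups if not req]
--     return req, opt
-- ===== SOURCE B (Python) =====
-- def _parse_terms_grammar(terms_raw: str):
--     # Single character-level scan (state machine); no split()/comprehension passes.
--     req, opt = [], []
--     group, group_required, buf = [], False, []
--
--     def end_alt():
--         nonlocal group_required
--         a = "".join(buf).strip()
--         buf.clear()
--         if not a:
--             return
--         if a[0] == "*" or a[-1] == "*":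
--             group_required = True
--             a = a.strip("*").strip()
--         group.append(a)
--
--     def end_group():
--         nonlocal group, group_required
--         if group:
--             (req if group_required else opt).append(group)
--         group, group_required = [], False
--
--     for ch in terms_raw:
--         if ch == ",":
--             end_alt()
--             end_group()
--         elif ch == "/":
--             end_alt()
--         else:
--             buf.append(ch)
--     end_alt()
--     end_group()
--     return req, opt
-- ===== Notes on version B (the rewrite author's own statement) =====
-- stated objective: alternative
-- what changed: Replaces A's split()-and-comprehension pipeline (split into comma pieces, split each piece into slash alternatives, build a (required, alts) groups list, then two filter passes) with a single character-level state machine that scans the raw string once, flushing an alternative buffer at each slash and a group at each comma, appending each finished group directly to req or opt.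
import Mathlib
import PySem

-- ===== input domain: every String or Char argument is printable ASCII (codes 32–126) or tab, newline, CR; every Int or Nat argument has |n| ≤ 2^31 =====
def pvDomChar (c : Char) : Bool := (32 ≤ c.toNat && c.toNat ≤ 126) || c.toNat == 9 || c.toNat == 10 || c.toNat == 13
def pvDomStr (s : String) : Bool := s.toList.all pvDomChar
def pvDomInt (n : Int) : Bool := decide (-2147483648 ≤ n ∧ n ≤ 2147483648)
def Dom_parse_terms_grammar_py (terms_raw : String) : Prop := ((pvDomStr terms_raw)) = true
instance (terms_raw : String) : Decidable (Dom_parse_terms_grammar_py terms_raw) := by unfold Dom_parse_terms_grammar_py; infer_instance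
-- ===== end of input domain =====

-- B replaces A's split()-and-comprehension pipeline with a single character-level state
-- machine over the raw string (objective: alternative, same O(n) cost).

-- ===== PORT A =====
-- inner loop body of A: marker check on an already-stripped alternative, append to cleaned
def pvCleanStepA (st : Bool × List String) (a : String) : Bool × List String :=
  if PySem.Str.endswith a "*" || PySem.Str.startswith a "*" then
    (true, st.2 ++ [PySem.Str.strip (PySem.Str.stripChars a "*")])
  else (st.1, st.2 ++ [a])

-- outer loop body of A: build alts, run the inner loop, append the (required, cleaned) group
def pvGroupStepA (gs : List (Bool × List String)) (raw : String) : List (Bool × List String) :=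
  let alts := (((PySem.Str.split? raw "/").getD []).filter
      (fun a => PySem.Str.strip a != "")).map PySem.Str.strip
  let rc := alts.foldl pvCleanStepA (false, [])
  if rc.2 != [] then gs ++ [rc] else gs

def parse_terms_grammar_py (terms_raw : String) : List (List String) × List (List String) :=
  let pieces := (((PySem.Str.split? terms_raw ",").getD []).filter
      (fun t => PySem.Str.strip t != "")).map PySem.Str.strip
  let groups := pieces.foldl pvGroupStepA []
  ((groups.filter (·.1)).map (·.2), (groups.filter (fun g => !g.1)).map (·.2))

-- ===== PORT B =====
-- Source B's end_alt(): flush the character buffer into the current group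
def pvEndAltB (g : List String) (f : Bool) (buf : List Char) : List String × Bool :=
  let a := PySem.Str.strip (String.ofList buf)
  if a == "" then (g, f)
  else if PySem.Str.pyGet? a 0 == some '*' || PySem.Str.pyGet? a (-1) == some '*' then
    (g ++ [PySem.Str.strip (PySem.Str.stripChars a "*")], true)
  else (g ++ [a], f)

-- Source B's end_group(): append the finished group to req or opt
def pvEndGroupB (req opt : List (List String)) (g : List String) (f : Bool) :
    List (List String) × List (List String) :=
  if g == [] then (req, opt)
  else if f then (req ++ [g], opt) else (req, opt ++ [g])

-- Source B's loop body: one character of the scan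
def pvScanStep (s : (List (List String) × List (List String)) × (List String × Bool × List Char))
    (c : Char) : (List (List String) × List (List String)) × (List String × Bool × List Char) :=
  if c = ',' then
    let gf := pvEndAltB s.2.1 s.2.2.1 s.2.2.2
    (pvEndGroupB s.1.1 s.1.2 gf.1 gf.2, ([], false, []))
  else if c = '/' then
    let gf := pvEndAltB s.2.1 s.2.2.1 s.2.2.2
    (s.1, (gf.1, gf.2, []))
  else (s.1, (s.2.1, s.2.2.1, s.2.2.2 ++ [c]))

def parse_terms_grammar_py_alt (terms_raw : String) : List (List String) × List (List String) :=
  let s := terms_raw.toList.foldl pvScanStep (([], []), ([], false, []))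
  let gf := pvEndAltB s.2.1 s.2.2.1 s.2.2.2
  pvEndGroupB s.1.1 s.1.2 gf.1 gf.2

-- ===== PRECONDITION & SPEC =====
def Spec_parse_terms_grammar_py (terms_raw : String) (out : List (List String) × List (List String)) : Prop := out = parse_terms_grammar_py_alt terms_raw
instance (terms_raw : String) (out : List (List String) × List (List String)) : Decidable (Spec_parse_terms_grammar_py terms_raw out) := by unfold Spec_parse_terms_grammar_py; infer_instance

-- ===== CLAIM (what is proved, stated in full; the proofs are below) =====
def Claim_equal_parse_terms_grammar_py : Prop := ∀ (terms_raw : String), Dom_parse_terms_grammar_py terms_raw → Spec_parse_terms_grammar_py terms_raw (parse_terms_grammar_py terms_raw)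

-- ===== LEMMAS AND PROOFS =====

-- reference single-character splitter: pvSplit d cs = cs split on the single character d
def pvSplit (d : Char) : List Char → List (List Char)
  | [] => [[]]
  | c :: cs => if c = d then [] :: pvSplit d cs else (pvSplit d cs).modifyHead (c :: ·)

theorem pvSplit_ne_nil (d : Char) (cs : List Char) : pvSplit d cs ≠ [] := by
  induction cs with
  | nil => simp [pvSplit]
  | cons c cs ih =>
    simp only [pvSplit]
    split_ifs <;> simp_all [List.modifyHead_eq_nil_iff]

theorem pvGo_eq (d : Char) (cs : List Char) (fuel : Nat) (cur : List Char)
    (acc : List (List Char)) (h : cs.length + 1 ≤ fuel) :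
    PySem.Chars.splitOn.go [d] fuel cs cur acc
      = acc.reverse ++ (pvSplit d cs).modifyHead (cur.reverse ++ ·) := by
  induction cs generalizing fuel cur acc with
  | nil =>
    obtain ⟨k, rfl⟩ : ∃ k, fuel = k + 1 := ⟨fuel - 1, by omega⟩
    rw [PySem.Chars.splitOn.go] <;> first | omega | simp [pvSplit]
  | cons c cs ih =>
    obtain ⟨k, rfl⟩ : ∃ k, fuel = k + 1 := ⟨fuel - 1, by omega⟩
    obtain ⟨p0, ps, hp⟩ := List.exists_cons_of_ne_nil (pvSplit_ne_nil d cs)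
    rw [PySem.Chars.splitOn.go]
    by_cases hc : c = d
    · subst hc
      have hpre : [c].isPrefixOf (c :: cs) = true := by simp [List.isPrefixOf]
      simp only [hpre, if_pos, List.length_singleton, List.drop_succ_cons, List.drop_zero]
      rw [ih _ [] (cur.reverse :: acc) (by simp at h; omega)]
      simp [pvSplit, hp]
    · have hpre : [d].isPrefixOf (c :: cs) = false := by
        simp [List.isPrefixOf]; exact fun hdc => (hc hdc.symm).elim
      simp only [hpre, Bool.false_eq_true, if_neg, not_false_iff]
      rw [ih _ (c :: cur) acc (by simp at h; omega)]
      simp [pvSplit, hc, hp]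

theorem pvSplitOn_eq (d : Char) (cs : List Char) :
    PySem.Chars.splitOn cs [d] = pvSplit d cs := by
  obtain ⟨p0, ps, hp⟩ := List.exists_cons_of_ne_nil (pvSplit_ne_nil d cs)
  rw [PySem.Chars.splitOn, pvGo_eq d cs (cs.length + 1) [] [] (le_refl _)]
  simp [hp]

-- === middle form of A (A with the piece/alt filters fused into the folds), from which
-- === both the filter form (A) and the character scan (B) are reached
def pvCleanMid (st : Bool × List String) (a0 : String) : Bool × List String :=
  let a := PySem.Str.strip a0
  if a == "" then st
  else if PySem.Str.startswith a "*" || PySem.Str.endswith a "*" then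
    (true, st.2 ++ [PySem.Str.strip (PySem.Str.stripChars a "*")])
  else (st.1, st.2 ++ [a])

def pvGroupMid (acc : List (List String) × List (List String)) (piece : String) :
    List (List String) × List (List String) :=
  let p := PySem.Str.strip piece
  if p == "" then acc
  else
    let rc := ((PySem.Str.split? p "/").getD []).foldl pvCleanMid (false, [])
    if rc.2 == [] then acc
    else if rc.1 then (acc.1 ++ [rc.2], acc.2) else (acc.1, acc.2 ++ [rc.2])

-- A's skip-empty inner loop = A's inner loop over the filtered-and-stripped alternatives
theorem pvCleanMid_eq (as : List String) (st : Bool × List String) :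
    as.foldl pvCleanMid st
      = ((as.filter (fun a => PySem.Str.strip a != "")).map PySem.Str.strip).foldl
          pvCleanStepA st := by
  induction as generalizing st with
  | nil => rfl
  | cons a as ih =>
    by_cases h : PySem.Str.strip a = ""
    · simp [pvCleanMid, h, ih]
    · simp [pvCleanMid, pvCleanStepA, h, ih, Bool.or_comm]

-- fusing A's two trailing filter passes into the fold
theorem pvFusedMid_eq (ts : List String) (gs : List (Bool × List String)) :
    ts.foldl pvGroupMid
        ((gs.filter (·.1)).map (·.2), (gs.filter (fun g => !g.1)).map (·.2))
      = (let gs' := ((ts.filter (fun t => PySem.Str.strip t != "")).map PySem.Str.strip).foldl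
            pvGroupStepA gs;
         ((gs'.filter (·.1)).map (·.2), (gs'.filter (fun g => !g.1)).map (·.2))) := by
  induction ts generalizing gs with
  | nil => rfl
  | cons t ts ih =>
    by_cases h : PySem.Str.strip t = ""
    · simpa [pvGroupMid, h] using ih gs
    · have hstep :
        pvGroupMid ((gs.filter (·.1)).map (·.2), (gs.filter (fun g => !g.1)).map (·.2)) t
          = ((pvGroupStepA gs (PySem.Str.strip t)).filter (·.1) |>.map (·.2),
             (pvGroupStepA gs (PySem.Str.strip t)).filter (fun g => !g.1) |>.map (·.2)) := by
        simp only [pvGroupMid, pvGroupStepA, h, beq_iff_eq, pvCleanMid_eq]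
        set rc := ((((PySem.Str.split? (PySem.Str.strip t) "/").getD []).filter
            (fun a => PySem.Str.strip a != "")).map PySem.Str.strip).foldl pvCleanStepA (false, [])
          with hrc
        by_cases hc : rc.2 = []
        · simp [hc]
        · by_cases hr : rc.1 <;>
            simp [hc, hr, List.filter_append, List.map_append]
      simp only [List.foldl_cons, hstep, List.filter_cons]
      simpa [h] using ih (pvGroupStepA gs (PySem.Str.strip t))

-- === B side: the character scan equals a piece-by-piece process over pvSplit ',' ===

-- scanning the remainder of a comma-free piece (Source B's '/' and default branches + final end_alt)
def pvInnerScan (g : List String) (f : Bool) (buf : List Char) : List Char → List String × Bool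
  | [] => pvEndAltB g f buf
  | c :: cs =>
    if c = '/' then pvInnerScan (pvEndAltB g f buf).1 (pvEndAltB g f buf).2 [] cs
    else pvInnerScan g f (buf ++ [c]) cs

def pvProcPieces (ro : List (List String) × List (List String)) :
    List (List Char) → List (List String) × List (List String)
  | [] => ro
  | p :: ps =>
    let gf := pvInnerScan [] false [] p
    pvProcPieces (pvEndGroupB ro.1 ro.2 gf.1 gf.2) ps

theorem pvScan_eq (cs : List Char) (req opt : List (List String)) (g : List String)
    (f : Bool) (buf : List Char) :
    (let s := cs.foldl pvScanStep ((req, opt), (g, f, buf));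
     let gf := pvEndAltB s.2.1 s.2.2.1 s.2.2.2;
     pvEndGroupB s.1.1 s.1.2 gf.1 gf.2)
      = pvProcPieces
          (let gf := pvInnerScan g f buf ((pvSplit ',' cs).headI);
           pvEndGroupB req opt gf.1 gf.2)
          ((pvSplit ',' cs).tail) := by
  induction cs generalizing req opt g f buf with
  | nil => simp [pvSplit, pvInnerScan, pvProcPieces]
  | cons c cs ih =>
    obtain ⟨p0, ps, hp⟩ := List.exists_cons_of_ne_nil (pvSplit_ne_nil ',' cs)
    by_cases hc : c = ','
    · subst hc
      simp only [List.foldl_cons, pvScanStep, if_pos rfl, pvSplit, ih, hp]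
      simp [pvProcPieces, pvInnerScan]
    · by_cases hs : c = '/'
      · subst hs
        simp only [List.foldl_cons, pvScanStep,
          if_neg (show ¬('/' : Char) = ',' by decide), if_pos rfl, pvSplit,
          if_neg hc, ih, hp]
        simp [pvInnerScan]
      · simp only [List.foldl_cons, pvScanStep, if_neg hc, if_neg hs, pvSplit, ih, hp]
        simp [pvInnerScan, if_neg hs]

-- === per-piece bridge: pvGroupMid on a raw piece = end_group of the inner scan ===

theorem pvInner_eq_fold (p : List Char) (g : List String) (f : Bool) (buf : List Char) :
    pvInnerScan g f buf p
      = ((pvSplit '/' p).modifyHead (buf ++ ·)).foldl (fun gf a => pvEndAltB gf.1 gf.2 a) (g, f) := by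
  induction p generalizing g f buf with
  | nil => simp [pvInnerScan, pvSplit]
  | cons c p ih =>
    obtain ⟨p0, ps, hp⟩ := List.exists_cons_of_ne_nil (pvSplit_ne_nil '/' p)
    by_cases hc : c = '/'
    · subst hc
      simp only [pvInnerScan, if_pos rfl, pvSplit, ih, hp]
      simp
    · simp only [pvInnerScan, if_neg hc, pvSplit, ih, hp, if_neg hc]
      simp

-- heads and tails: Source B's a[0] test = A's startswith, a[-1] test = A's endswith
theorem pvHead_eq (l : List Char) (h : l ≠ []) :
    (PySem.List.pyGet? l 0 == some '*') = PySem.Chars.startswith l ['*'] := by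
  obtain ⟨x, xs, rfl⟩ := List.exists_cons_of_ne_nil h
  simp [PySem.List.pyGet?, PySem.List.pyIdx?, PySem.Chars.startswith, List.isPrefixOf, eq_comm]

theorem pvLast_eq (l : List Char) (h : l ≠ []) :
    (PySem.List.pyGet? l (-1) == some '*') = PySem.Chars.endswith l ['*'] := by
  rcases (List.eq_nil_or_concat l) with rfl | ⟨ys, y, rfl⟩
  · exact absurd rfl h
  · simp [PySem.List.pyGet?, PySem.List.pyIdx?, PySem.Chars.endswith, List.isSuffixOf,
      List.isPrefixOf, eq_comm]

-- the star-marker test of Source B (a[0]/a[-1]) = the one of A (startswith/endswith), nonempty a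
theorem pvStar_eq (a : String) (h : a.toList ≠ []) :
    (PySem.Str.pyGet? a 0 == some '*' || PySem.Str.pyGet? a (-1) == some '*')
      = (PySem.Str.startswith a "*" || PySem.Str.endswith a "*") := by
  rw [PySem.Str.pyGet?, PySem.Str.pyGet?, PySem.Str.startswith, PySem.Str.endswith]
  have ht : ("*" : String).toList = ['*'] := by decide
  rw [ht]
  simp only [PySem.Chars.pyGet?_eq_listPyGet?]
  rw [pvHead_eq a.toList h, pvLast_eq a.toList h]

-- the raw-buffer fold = A's inner fold over the filtered-and-stripped alternatives
theorem pvRawFold_eq (as : List (List Char)) (g : List String) (f : Bool) :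
    as.foldl (fun gf a => pvEndAltB gf.1 gf.2 a) (g, f)
      = (let st := ((((as.map String.ofList).filter (fun a => PySem.Str.strip a != "")).map
            PySem.Str.strip).foldl pvCleanStepA (f, g));
         (st.2, st.1)) := by
  induction as generalizing g f with
  | nil => rfl
  | cons a as ih =>
    by_cases hs : PySem.Str.strip (String.ofList a) = ""
    · simp only [List.foldl_cons, List.map_cons, List.filter_cons, hs]
      rw [show pvEndAltB g f a = (g, f) by simp [pvEndAltB, hs]]
      simpa using ih g f
    · have hsc : PySem.Chars.strip a ≠ [] := by
        intro h0
        exact hs (by simp [PySem.Str.strip, h0])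
      have hne : (PySem.Str.strip (String.ofList a)).toList ≠ [] := by
        simpa [PySem.Str.strip] using hsc
      have hcond : (PySem.Str.strip (String.ofList a) != "") = true := by simpa using hs
      have hstep : pvEndAltB g f a
          = ((pvCleanStepA (f, g) (PySem.Str.strip (String.ofList a))).2,
             (pvCleanStepA (f, g) (PySem.Str.strip (String.ofList a))).1) := by
        simp only [pvEndAltB, pvCleanStepA]
        rw [if_neg (show ¬(PySem.Str.strip (String.ofList a) == "") = true by simpa using hs),
          pvStar_eq _ hne, Bool.or_comm]
        by_cases hb : (PySem.Str.endswith (PySem.Str.strip (String.ofList a)) "*"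
            || PySem.Str.startswith (PySem.Str.strip (String.ofList a)) "*") = true
        · rw [if_pos hb, if_pos hb]
        · rw [if_neg hb, if_neg hb]
      simp only [List.foldl_cons, hstep, List.map_cons, List.filter_cons, hcond, if_pos,
        List.map_cons, List.foldl_cons]
      simpa [Prod.mk.eta] using
        ih (pvCleanStepA (f, g) (PySem.Str.strip (String.ofList a))).2
          (pvCleanStepA (f, g) (PySem.Str.strip (String.ofList a))).1

-- the filtered-and-stripped alternatives of a raw piece, as A computes them
def pvAlts (q : List Char) : List String :=
  (((pvSplit '/' q).map String.ofList).filter (fun a => PySem.Str.strip a != "")).map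
    PySem.Str.strip

theorem pvStripOf (q : List Char) :
    PySem.Str.strip (String.ofList q) = String.ofList (PySem.Chars.strip q) := by
  simp [PySem.Str.strip]

theorem pvStripCons (w : Char) (l : List Char) (hw : PySem.Chars.isspace w = true) :
    PySem.Chars.strip (w :: l) = PySem.Chars.strip l := by
  simp [PySem.Chars.strip, PySem.Chars.lstrip, List.dropWhile_cons, hw]

theorem pvRstripApp (w : Char) (l : List Char) (hw : PySem.Chars.isspace w = true) :
    PySem.Chars.rstrip (l ++ [w]) = PySem.Chars.rstrip l := by
  simp [PySem.Chars.rstrip, List.reverse_append, List.dropWhile_cons, hw]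

theorem pvStripApp (w : Char) (l : List Char) (hw : PySem.Chars.isspace w = true) :
    PySem.Chars.strip (l ++ [w]) = PySem.Chars.strip l := by
  by_cases h : PySem.Chars.lstrip l = []
  · have hall : ∀ x ∈ l, PySem.Chars.isspace x = true := by
      simpa [PySem.Chars.lstrip, List.dropWhile_eq_nil_iff] using h
    have h2 : PySem.Chars.lstrip (l ++ [w]) = [] := by
      simp only [PySem.Chars.lstrip, List.dropWhile_eq_nil_iff]
      intro x hx
      rcases List.mem_append.mp hx with hx | hx
      · exact hall x hx
      · simpa [List.mem_singleton.mp hx] using hw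
    simp [PySem.Chars.strip, h, h2, PySem.Chars.rstrip]
  · have hcond : ¬(∀ x ∈ l, PySem.Chars.isspace x = true) := by
      intro hall
      exact h (by simpa [PySem.Chars.lstrip, List.dropWhile_eq_nil_iff] using hall)
    have hl : PySem.Chars.lstrip (l ++ [w]) = PySem.Chars.lstrip l ++ [w] := by
      simp [PySem.Chars.lstrip, List.dropWhile_append, List.dropWhile_eq_nil_iff, hcond]
    simp only [PySem.Chars.strip, hl]
    exact pvRstripApp w _ hw

theorem pvWs_ne_slash (w : Char) (hw : PySem.Chars.isspace w = true) : w ≠ '/' := by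
  intro h; subst h; simp [PySem.Chars.isspace] at hw

theorem pvSplitApp (d c : Char) (l : List Char) (hc : c ≠ d) :
    pvSplit d (l ++ [c]) = (pvSplit d l).modifyLast (· ++ [c]) := by
  induction l with
  | nil =>
    rw [show pvSplit d [] = [] ++ [([] : List Char)] from rfl, List.modifyLast_concat]
    simp [pvSplit, hc]
  | cons x l ih =>
    obtain ⟨zs, z, hp⟩ := (List.eq_nil_or_concat (pvSplit d l)).resolve_left (pvSplit_ne_nil d l)
    rw [List.concat_eq_append] at hp
    by_cases hx : x = d
    · subst hx
      have e1 : pvSplit x (x :: (l ++ [c])) = [] :: pvSplit x (l ++ [c]) := by simp [pvSplit]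
      have e2 : pvSplit x (x :: l) = [] :: pvSplit x l := by simp [pvSplit]
      rw [List.cons_append, e1, ih, hp, List.modifyLast_concat, e2, hp,
        show ([] : List Char) :: (zs ++ [z]) = (([] :: zs) ++ [z]) by simp,
        List.modifyLast_concat]
      simp
    · have e1 : pvSplit d (x :: (l ++ [c])) = (pvSplit d (l ++ [c])).modifyHead (x :: ·) := by
        simp [pvSplit, hx]
      have e2 : pvSplit d (x :: l) = (pvSplit d l).modifyHead (x :: ·) := by
        simp [pvSplit, hx]
      rw [List.cons_append, e1, ih, hp, List.modifyLast_concat, e2, hp]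
      cases zs with
      | nil =>
        simp only [List.nil_append, List.modifyHead_cons]
        rw [show [x :: z] = ([] ++ [x :: z]) by simp, List.modifyLast_concat]
        simp
      | cons z0 zs' =>
        simp only [List.cons_append, List.modifyHead_cons]
        rw [show (x :: z0) :: (zs' ++ [z]) = (((x :: z0) :: zs') ++ [z]) by simp,
          List.modifyLast_concat]
        simp

theorem pvAltsList_modLast (l : List (List Char)) (w : Char)
    (hw : PySem.Chars.isspace w = true) :
    (((l.modifyLast (· ++ [w])).map String.ofList).filter
        (fun a => PySem.Str.strip a != "")).map PySem.Str.strip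
      = ((l.map String.ofList).filter (fun a => PySem.Str.strip a != "")).map
          PySem.Str.strip := by
  rcases List.eq_nil_or_concat l with rfl | ⟨zs, z, hl⟩
  · rfl
  · rw [List.concat_eq_append] at hl
    subst hl
    rw [List.modifyLast_concat]
    have hstr : PySem.Str.strip (String.ofList (z ++ [w])) = PySem.Str.strip (String.ofList z) := by
      rw [pvStripOf, pvStripOf, pvStripApp w z hw]
    have hkey : List.map PySem.Str.strip
          (List.filter (fun a => PySem.Str.strip a != "") [String.ofList (z ++ [w])])
        = List.map PySem.Str.strip
          (List.filter (fun a => PySem.Str.strip a != "") [String.ofList z]) := by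
      by_cases hz : (PySem.Str.strip (String.ofList z) != "") = true
      · rw [List.filter_cons, List.filter_cons, hstr, if_pos hz, if_pos hz]
        simp only [List.filter_nil, List.map_cons, List.map_nil, hstr]
      · rw [List.filter_cons, List.filter_cons, hstr, if_neg hz, if_neg hz]
    simp only [List.map_append, List.filter_append, List.map_append, List.map_cons,
      List.map_nil, hkey]

-- whitespace at either end of a piece does not change its alternatives
theorem pvAlts_cons_ws (w : Char) (p : List Char) (hw : PySem.Chars.isspace w = true) :
    pvAlts (w :: p) = pvAlts p := by
  obtain ⟨p0, ps, hp⟩ := List.exists_cons_of_ne_nil (pvSplit_ne_nil '/' p)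
  have hstr : PySem.Str.strip (String.ofList (w :: p0)) = PySem.Str.strip (String.ofList p0) := by
    rw [pvStripOf, pvStripOf, pvStripCons w p0 hw]
  simp only [pvAlts, pvSplit, if_neg (pvWs_ne_slash w hw), hp, List.modifyHead_cons,
    List.map_cons]
  by_cases hz : (PySem.Str.strip (String.ofList p0) != "") = true
  · rw [List.filter_cons, List.filter_cons, hstr, if_pos hz, if_pos hz]
    simp [hstr]
  · rw [List.filter_cons, List.filter_cons, hstr, if_neg hz, if_neg hz]

theorem pvAlts_concat_ws (w : Char) (p : List Char) (hw : PySem.Chars.isspace w = true) :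
    pvAlts (p ++ [w]) = pvAlts p := by
  rw [pvAlts, pvSplitApp '/' w p (fun h => pvWs_ne_slash w hw h)]
  exact pvAltsList_modLast _ w hw

theorem pvAlts_lstrip (p : List Char) : pvAlts (PySem.Chars.lstrip p) = pvAlts p := by
  induction p with
  | nil => rfl
  | cons c p ih =>
    by_cases hw : PySem.Chars.isspace c = true
    · rw [show PySem.Chars.lstrip (c :: p) = PySem.Chars.lstrip p by
        simp [PySem.Chars.lstrip, hw], ih, pvAlts_cons_ws c p hw]
    · rw [show PySem.Chars.lstrip (c :: p) = c :: p by
        simp [PySem.Chars.lstrip, hw]]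

theorem pvAlts_rstrip (p : List Char) : pvAlts (PySem.Chars.rstrip p) = pvAlts p := by
  induction p using List.reverseRecOn with
  | nil => rfl
  | append_singleton ys y ih =>
    by_cases hw : PySem.Chars.isspace y = true
    · rw [pvRstripApp y ys hw, ih, pvAlts_concat_ws y ys hw]
    · rw [show PySem.Chars.rstrip (ys ++ [y]) = ys ++ [y] by
        simp [PySem.Chars.rstrip, List.reverse_append, hw]]

-- stripping a piece does not change its filtered-and-stripped alternatives
theorem pvAlts_strip (p : List Char) : pvAlts (PySem.Chars.strip p) = pvAlts p := by
  rw [show PySem.Chars.strip p = PySem.Chars.rstrip (PySem.Chars.lstrip p) from rfl,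
    pvAlts_rstrip, pvAlts_lstrip]

theorem pvPiece_eq (p : List Char) (ro : List (List String) × List (List String)) :
    pvGroupMid ro (String.ofList p)
      = (let gf := pvInnerScan [] false [] p; pvEndGroupB ro.1 ro.2 gf.1 gf.2) := by
  have hinner : pvInnerScan [] false [] p
      = (let st := (pvAlts p).foldl pvCleanStepA (false, []); (st.2, st.1)) := by
    obtain ⟨p0, ps, hp⟩ := List.exists_cons_of_ne_nil (pvSplit_ne_nil '/' p)
    rw [pvInner_eq_fold, show (pvSplit '/' p).modifyHead (([] : List Char) ++ ·)
        = pvSplit '/' p by simp [hp]]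
    rw [pvRawFold_eq (pvSplit '/' p) [] false]
    rfl
  by_cases h0 : PySem.Chars.strip p = []
  · have ha : pvAlts p = [] := by
      rw [← pvAlts_strip, h0]
      rfl
    rw [show pvGroupMid ro (String.ofList p) = ro by
      simp [pvGroupMid, pvStripOf, h0]]
    simp [hinner, ha, pvEndGroupB]
  · have hsne : ¬(PySem.Str.strip (String.ofList p) == "") = true := by
      simp [pvStripOf, h0]
    have hraw : ((PySem.Str.split? (PySem.Str.strip (String.ofList p)) "/").getD [])
        = (pvSplit '/' (PySem.Chars.strip p)).map String.ofList := by
      rw [pvStripOf]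
      simp [PySem.Str.split?, PySem.Chars.split?,
        show ("/" : String).toList = ['/'] by decide, pvSplitOn_eq]
    have hrc : ((PySem.Str.split? (PySem.Str.strip (String.ofList p)) "/").getD []).foldl
          pvCleanMid (false, [])
        = (pvAlts p).foldl pvCleanStepA (false, []) := by
      rw [hraw, pvCleanMid_eq, ← pvAlts_strip p]
      rfl
    simp only [pvGroupMid, if_neg hsne, hrc, hinner, pvEndGroupB]

theorem pvMid_eq_proc (ps : List (List Char)) (ro : List (List String) × List (List String)) :
    (ps.map String.ofList).foldl pvGroupMid ro = pvProcPieces ro ps := by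
  induction ps generalizing ro with
  | nil => rfl
  | cons p ps ih => simp [pvProcPieces, pvPiece_eq, ih]

-- ===== VERDICT (by name: the statement is the Claim_ definition above) =====
theorem parse_terms_grammar_py_spec : Claim_equal_parse_terms_grammar_py := by
  intro terms_raw _
  unfold Spec_parse_terms_grammar_py
  have hsplit : ((PySem.Str.split? terms_raw ",").getD [])
      = (pvSplit ',' terms_raw.toList).map String.ofList := by
    simp [PySem.Str.split?, PySem.Chars.split?,
      show ("," : String).toList = [','] by decide, pvSplitOn_eq]
  have hA : parse_terms_grammar_py terms_raw
      = ((pvSplit ',' terms_raw.toList).map String.ofList).foldl pvGroupMid ([], []) := by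
    unfold parse_terms_grammar_py
    rw [← hsplit]
    simpa using (pvFusedMid_eq ((PySem.Str.split? terms_raw ",").getD []) []).symm
  have hB : parse_terms_grammar_py_alt terms_raw
      = pvProcPieces ([], []) (pvSplit ',' terms_raw.toList) := by
    obtain ⟨p0, ps, hp⟩ := List.exists_cons_of_ne_nil (pvSplit_ne_nil ',' terms_raw.toList)
    have hscan := pvScan_eq terms_raw.toList [] [] [] false []
    simp only [hp, List.headI, List.tail] at hscan
    rw [parse_terms_grammar_py_alt, hscan, hp]
    simp [pvProcPieces]
  rw [hA, hB, pvMid_eq_proc]
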